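-- pv_equiv track=rewrite | github.com/aldebaran/qibuild | python/qisys/version.py | explode_version
-- ===== SOURCE A (Python) =====
-- def eat_number(input_str, index):
--     """ Helper for explode_version """
--     first = index
--     while index < len(input_str):
--         if not input_str[index].isdigit():
--             break
--         index += 1
--     return input_str[first:index], index
--
-- def eat_alpha(input_str, index):
--     """ Helper for explode_version """
--     first = index
--     while index < len(input_str):
--         if not input_str[index].isalpha():
--             break
--         index += 1
--     return input_str[first:index], index
--
-- def explode_version(input_str):
--     """
--     Explode a version string into a list made of either numbers,
--     or alphabetic chars, or separators
--     >>> explode_version('1.2.3')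
--     ['1', '.', '2', '.', '3']
--     >>> explode_version('1.2.3-rc1')
--     ['1', '.', '2', '.', '3', '-', 'rc', '1']
--     """
--     res = list()
--     index = 0
--     while index < len(input_str):
--         if input_str[index].isdigit():
--             (to_append, index) = eat_number(input_str, index)
--             res.append(to_append)
--         elif input_str[index].isalpha():
--             (to_append, index) = eat_alpha(input_str, index)
--             res.append(to_append)
--         else:
--             # append a string with just one char
--             res.append("%s" % input_str[index])
--             index += 1
--     return res
-- ===== SOURCE B (Python) =====
-- def explode_version(input_str):
--     res = []
--     last = 2  # class of the previous char: 0 digit, 1 alpha, 2 separator/none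
--     for ch in input_str:
--         cls = 0 if ch.isdigit() else 1 if ch.isalpha() else 2
--         if cls != 2 and cls == last:
--             res[-1] += ch
--         else:
--             res.append(ch)
--         last = cls
--     return res
-- ===== Notes on version B (the rewrite author's own statement) =====
-- stated objective: simpler
-- what changed: Replaces the index-pointer while-loop with its two eat_number/eat_alpha scanning helpers by a single one-pass fold that classifies each character (digit/alpha/separator) and either extends the last token in place or starts a new one.
import Mathlib
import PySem

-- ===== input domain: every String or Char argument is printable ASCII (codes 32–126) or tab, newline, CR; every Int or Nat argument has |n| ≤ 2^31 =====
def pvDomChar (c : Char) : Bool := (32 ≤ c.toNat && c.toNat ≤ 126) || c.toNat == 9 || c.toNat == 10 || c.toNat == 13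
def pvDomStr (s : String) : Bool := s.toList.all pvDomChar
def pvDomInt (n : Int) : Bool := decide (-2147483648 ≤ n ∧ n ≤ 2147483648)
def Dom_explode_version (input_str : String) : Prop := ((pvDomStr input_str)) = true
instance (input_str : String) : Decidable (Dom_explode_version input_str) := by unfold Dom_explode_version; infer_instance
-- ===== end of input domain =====

-- B replaces A's index-pointer while-loop and its two eat_* scanning helpers by a single
-- one-pass fold that classifies each character and extends the last token or starts a new one
-- (objective: simpler).

-- ===== PORT A =====
-- while index < len ∧ input_str[index].isdigit(): index += 1   (returns the final index)
def eatNumberLoop (s : List Char) (index : Nat) : Nat :=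
  if h : index < s.length then
    if PySem.Chars.isdigit s[index] then eatNumberLoop s (index + 1) else index
  else index
termination_by s.length - index

theorem eatNumberLoop_ge (s : List Char) (index : Nat) : index ≤ eatNumberLoop s index := by
  unfold eatNumberLoop
  split
  · split
    · exact Nat.le_trans (Nat.le_succ index) (eatNumberLoop_ge s (index + 1))
    · exact Nat.le_refl index
  · exact Nat.le_refl index
termination_by s.length - index

-- input_str[first:index] with 0 ≤ first ≤ index ≤ len is exactly (s.drop first).take (index - first)
def eat_number (s : List Char) (index : Nat) : String × Nat :=
  let j := eatNumberLoop s index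
  (String.ofList ((s.drop index).take (j - index)), j)

def eatAlphaLoop (s : List Char) (index : Nat) : Nat :=
  if h : index < s.length then
    if PySem.Chars.isalpha s[index] then eatAlphaLoop s (index + 1) else index
  else index
termination_by s.length - index

theorem eatAlphaLoop_ge (s : List Char) (index : Nat) : index ≤ eatAlphaLoop s index := by
  unfold eatAlphaLoop
  split
  · split
    · exact Nat.le_trans (Nat.le_succ index) (eatAlphaLoop_ge s (index + 1))
    · exact Nat.le_refl index
  · exact Nat.le_refl index
termination_by s.length - index

def eat_alpha (s : List Char) (index : Nat) : String × Nat :=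
  let j := eatAlphaLoop s index
  (String.ofList ((s.drop index).take (j - index)), j)

-- the main while-loop of A, as structural recursion on the remaining length
def explodeLoop (s : List Char) (index : Nat) : List String :=
  if h : index < s.length then
    if hd : PySem.Chars.isdigit s[index] then
      let r := eat_number s index
      r.1 :: explodeLoop s r.2
    else if ha : PySem.Chars.isalpha s[index] then
      let r := eat_alpha s index
      r.1 :: explodeLoop s r.2
    else
      String.ofList [s[index]] :: explodeLoop s (index + 1)
  else []
termination_by s.length - index
decreasing_by
  · have h1 : index + 1 ≤ eatNumberLoop s (index + 1) := eatNumberLoop_ge s (index + 1)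
    have h2 : (eat_number s index).2 = eatNumberLoop s (index + 1) := by
      simp only [eat_number]
      conv_lhs => rw [eatNumberLoop]
      rw [dif_pos h, if_pos hd]
    simp only [h2]; omega
  · have h1 : index + 1 ≤ eatAlphaLoop s (index + 1) := eatAlphaLoop_ge s (index + 1)
    have h2 : (eat_alpha s index).2 = eatAlphaLoop s (index + 1) := by
      simp only [eat_alpha]
      conv_lhs => rw [eatAlphaLoop]
      rw [dif_pos h, if_pos ha]
    simp only [h2]; omega
  · omega

def explode_version (input_str : String) : List String :=
  explodeLoop input_str.toList 0

-- ===== PORT B =====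
-- class of a char: 0 digit, 1 alpha, 2 separator
def pyClass (c : Char) : Nat :=
  if PySem.Chars.isdigit c then 0 else if PySem.Chars.isalpha c then 1 else 2

-- res[-1] += ch  (B only takes this branch when res is nonempty)
def extendLast (res : List String) (c : Char) : List String :=
  match res with
  | [] => []
  | [t] => [t.push c]
  | t :: rest => t :: extendLast rest c

def altStep (st : List String × Nat) (c : Char) : List String × Nat :=
  let cls := pyClass c
  if cls ≠ 2 ∧ cls = st.2 then (extendLast st.1 c, cls)
  else (st.1 ++ [String.ofList [c]], cls)

def explode_version_alt (input_str : String) : List String :=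
  (input_str.toList.foldl altStep ([], 2)).1

-- ===== PRECONDITION & SPEC =====
def Spec_explode_version (input_str : String) (out : List String) : Prop := out = explode_version_alt input_str
instance (input_str : String) (out : List String) : Decidable (Spec_explode_version input_str out) := by unfold Spec_explode_version; infer_instance

-- ===== CLAIM (what is proved, stated in full; the proofs are below) =====
def Claim_equal_explode_version : Prop := ∀ (input_str : String), Dom_explode_version input_str → Spec_explode_version input_str (explode_version input_str)

-- ===== LEMMAS AND PROOFS =====

-- common tokenization: a digit run, an alpha run, or a single separator char
def gSpec : List Char → List String
  | [] => []
  | c :: cs =>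
    if PySem.Chars.isdigit c then
      String.ofList (c :: cs.takeWhile PySem.Chars.isdigit) :: gSpec (cs.dropWhile PySem.Chars.isdigit)
    else if PySem.Chars.isalpha c then
      String.ofList (c :: cs.takeWhile PySem.Chars.isalpha) :: gSpec (cs.dropWhile PySem.Chars.isalpha)
    else
      String.ofList [c] :: gSpec cs
termination_by s => s.length
decreasing_by
  · have := List.length_dropWhile_le (p := PySem.Chars.isdigit) (l := cs); simp; omega
  · have := List.length_dropWhile_le (p := PySem.Chars.isalpha) (l := cs); simp; omega
  · simp

theorem isdigit_not_isalpha (c : Char) (h : PySem.Chars.isdigit c = true) :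
    PySem.Chars.isalpha c = false := by
  simp only [PySem.Chars.isdigit, PySem.Chars.isalpha, PySem.Chars.isupper, PySem.Chars.islower,
    Bool.and_eq_true, Bool.or_eq_false_iff, Bool.and_eq_false_iff, decide_eq_true_eq,
    decide_eq_false_iff_not, Char.le_def, UInt32.le_iff_toNat_le] at h ⊢
  have e0 : ('0'.val).toNat = 48 := rfl
  have e9 : ('9'.val).toNat = 57 := rfl
  have eA : ('A'.val).toNat = 65 := rfl
  have eZ : ('Z'.val).toNat = 90 := rfl
  have ea : ('a'.val).toNat = 97 := rfl
  have ez : ('z'.val).toNat = 122 := rfl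
  omega

theorem pyClass_eq_zero_iff (c : Char) : pyClass c = 0 ↔ PySem.Chars.isdigit c = true := by
  unfold pyClass; split_ifs <;> simp_all

theorem pyClass_eq_one_iff (c : Char) : pyClass c = 1 ↔ PySem.Chars.isalpha c = true := by
  unfold pyClass
  split_ifs with hd ha
  · simp [isdigit_not_isalpha c hd]
  · simp [ha]
  · simp [ha]

theorem take_length_takeWhile (p : Char → Bool) (l : List Char) :
    l.take (l.takeWhile p).length = l.takeWhile p := by
  induction l with
  | nil => rfl
  | cons c cs ih => by_cases h : p c <;> simp [h, ih]

theorem drop_length_takeWhile (p : Char → Bool) (l : List Char) :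
    l.drop (l.takeWhile p).length = l.dropWhile p := by
  induction l with
  | nil => rfl
  | cons c cs ih => by_cases h : p c <;> simp [h, ih]

theorem dropWhile_head_false (p : Char → Bool) (l : List Char) (c : Char) (t : List Char)
    (h : l.dropWhile p = c :: t) : p c = false := by
  have w : l.dropWhile p ≠ [] := by simp [h]
  have := List.head_dropWhile_not p w
  rwa [show (l.dropWhile p).head w = c by simp [h]] at this

theorem eatNumberLoop_eq (s : List Char) (index : Nat) :
    eatNumberLoop s index = index + ((s.drop index).takeWhile PySem.Chars.isdigit).length := by
  fun_induction eatNumberLoop s index with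
  | case1 index h hd ih =>
    rw [ih, List.drop_eq_getElem_cons h, List.takeWhile_cons, if_pos hd]
    simp; omega
  | case2 index h hd =>
    rw [List.drop_eq_getElem_cons h, List.takeWhile_cons, if_neg hd]
    simp
  | case3 index h =>
    rw [List.drop_eq_nil_of_le (by omega)]
    simp
theorem eatAlphaLoop_eq (s : List Char) (index : Nat) :
    eatAlphaLoop s index = index + ((s.drop index).takeWhile PySem.Chars.isalpha).length := by
  fun_induction eatAlphaLoop s index with
  | case1 index h hd ih =>
    rw [ih, List.drop_eq_getElem_cons h, List.takeWhile_cons, if_pos hd]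
    simp; omega
  | case2 index h hd =>
    rw [List.drop_eq_getElem_cons h, List.takeWhile_cons, if_neg hd]
    simp
  | case3 index h =>
    rw [List.drop_eq_nil_of_le (by omega)]
    simp

theorem explodeLoop_eq_gSpec (s : List Char) (index : Nat) :
    explodeLoop s index = gSpec (s.drop index) := by
  fun_induction explodeLoop s index with
  | case1 index h hd r ih =>
    have hcons : s.drop index = s[index] :: s.drop (index + 1) := List.drop_eq_getElem_cons h
    have hj : r.2 = index + ((s.drop index).takeWhile PySem.Chars.isdigit).length := by
      simp [r, eat_number, eatNumberLoop_eq]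
    have htok : r.1 = String.ofList ((s.drop index).takeWhile PySem.Chars.isdigit) := by
      simp only [r, eat_number, eatNumberLoop_eq]
      rw [Nat.add_sub_cancel_left, take_length_takeWhile]
    have hdrop : s.drop r.2 = (s.drop index).dropWhile PySem.Chars.isdigit := by
      rw [hj, ← List.drop_drop, drop_length_takeWhile]
    rw [ih, htok, hdrop, hcons, gSpec, if_pos hd, List.takeWhile_cons, if_pos hd,
      List.dropWhile_cons, if_pos hd]
  | case2 index h hd ha r ih =>
    have hcons : s.drop index = s[index] :: s.drop (index + 1) := List.drop_eq_getElem_cons h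
    have hj : r.2 = index + ((s.drop index).takeWhile PySem.Chars.isalpha).length := by
      simp [r, eat_alpha, eatAlphaLoop_eq]
    have htok : r.1 = String.ofList ((s.drop index).takeWhile PySem.Chars.isalpha) := by
      simp only [r, eat_alpha, eatAlphaLoop_eq]
      rw [Nat.add_sub_cancel_left, take_length_takeWhile]
    have hdrop : s.drop r.2 = (s.drop index).dropWhile PySem.Chars.isalpha := by
      rw [hj, ← List.drop_drop, drop_length_takeWhile]
    rw [ih, htok, hdrop, hcons, gSpec, if_neg hd, if_pos ha, List.takeWhile_cons, if_pos ha,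
      List.dropWhile_cons, if_pos ha]
  | case3 index h hd ha ih =>
    have hcons : s.drop index = s[index] :: s.drop (index + 1) := List.drop_eq_getElem_cons h
    rw [ih, hcons, gSpec, if_neg (by simp [hd]), if_neg (by simp [ha])]
  | case4 index h =>
    rw [List.drop_eq_nil_of_le (by omega)]
    simp [gSpec]

theorem extendLast_append (acc : List String) (t : String) (c : Char) :
    extendLast (acc ++ [t]) c = acc ++ [t.push c] := by
  induction acc with
  | nil => rfl
  | cons a as ih =>
    cases as with
    | nil => rfl
    | cons b bs =>
      have : extendLast (a :: ((b :: bs) ++ [t])) c = a :: extendLast ((b :: bs) ++ [t]) c := rfl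
      simp only [List.cons_append] at this ih ⊢
      rw [this, ih]

-- run lemma: while heads have class cls, B extends the last token
theorem foldB_run (p : Char → Bool) (cls : Nat)
    (h1 : ∀ c, p c = true → pyClass c = cls)
    (h2 : ∀ c, p c = false → pyClass c ≠ cls) (hcls : cls ≠ 2) :
    ∀ (s : List Char) (acc : List String) (t : String),
      List.foldl altStep (acc ++ [t], cls) s
        = List.foldl altStep (acc ++ [String.ofList (t.toList ++ s.takeWhile p)], cls) (s.dropWhile p) := by
  intro s
  induction s with
  | nil => intro acc t; simp [String.ofList_toList]
  | cons c cs ih =>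
    intro acc t
    by_cases hc : p c
    · have hcc : pyClass c = cls := h1 c hc
      rw [List.foldl_cons, show altStep (acc ++ [t], cls) c = (acc ++ [t.push c], cls) by
        simp [altStep, hcc, hcls, extendLast_append], ih]
      rw [List.takeWhile_cons, if_pos hc, List.dropWhile_cons, if_pos hc]
      simp [String.toList_push]
    · have hcc : pyClass c ≠ cls := h2 c (by simp [hc])
      rw [List.takeWhile_cons, if_neg hc, List.dropWhile_cons, if_neg hc]
      simp [String.ofList_toList]

theorem foldB_eq (s : List Char) : ∀ (acc : List String) (last : Nat),
    (match s with | [] => True | c :: _ => pyClass c = 2 ∨ pyClass c ≠ last) →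
    (List.foldl altStep (acc, last) s).1 = acc ++ gSpec s := by
  fun_induction gSpec s with
  | case1 => intro acc last _; simp
  | case2 c cs hd ih =>
    intro acc last hc
    have hc0 : pyClass c = 0 := (pyClass_eq_zero_iff c).mpr hd
    have hlast : pyClass c ≠ last := by
      rcases hc with h | h
      · omega
      · exact h
    have h0 : (0 : Nat) ≠ last := by rw [← hc0]; exact hlast
    rw [List.foldl_cons, show altStep (acc, last) c = (acc ++ [String.ofList [c]], 0) by
      simp [altStep, hc0, h0]]
    rw [foldB_run PySem.Chars.isdigit 0
      (fun c' hc' => (pyClass_eq_zero_iff c').mpr hc')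
      (fun c' hc' => fun hcon => by rw [(pyClass_eq_zero_iff c').mp hcon] at hc'; simp at hc')
      (by omega)]
    rw [ih _ 0 (by
      cases hdw : cs.dropWhile PySem.Chars.isdigit with
      | nil => trivial
      | cons d t =>
        have hne := dropWhile_head_false _ _ _ _ hdw
        exact Or.inr (fun hcon => by
          rw [(pyClass_eq_zero_iff d).mp hcon] at hne; simp at hne))]
    simp [String.toList_ofList]
  | case3 c cs hd ha ih =>
    intro acc last hc
    have hc1 : pyClass c = 1 := (pyClass_eq_one_iff c).mpr ha
    have hlast : pyClass c ≠ last := by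
      rcases hc with h | h
      · omega
      · exact h
    have h1' : (1 : Nat) ≠ last := by rw [← hc1]; exact hlast
    rw [List.foldl_cons, show altStep (acc, last) c = (acc ++ [String.ofList [c]], 1) by
      simp [altStep, hc1, h1']]
    rw [foldB_run PySem.Chars.isalpha 1
      (fun c' hc' => (pyClass_eq_one_iff c').mpr hc')
      (fun c' hc' => fun hcon => by rw [(pyClass_eq_one_iff c').mp hcon] at hc'; simp at hc')
      (by omega)]
    rw [ih _ 1 (by
      cases hdw : cs.dropWhile PySem.Chars.isalpha with
      | nil => trivial
      | cons d t =>
        have hne := dropWhile_head_false _ _ _ _ hdw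
        exact Or.inr (fun hcon => by
          rw [(pyClass_eq_one_iff d).mp hcon] at hne; simp at hne))]
    simp [String.toList_ofList]
  | case4 c cs hd ha ih =>
    intro acc last _
    have hc2 : pyClass c = 2 := by simp [pyClass, hd, ha]
    rw [List.foldl_cons, show altStep (acc, last) c = (acc ++ [String.ofList [c]], 2) by
      simp [altStep, hc2]]
    rw [ih _ 2 (by
      cases cs with
      | nil => trivial
      | cons d t => exact if h : pyClass d = 2 then Or.inl h else Or.inr h)]
    simp

-- ===== VERDICT (by name: the statement is the Claim_ definition above) =====
theorem explode_version_spec : Claim_equal_explode_version := by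
  intro input_str _
  unfold Spec_explode_version explode_version explode_version_alt
  rw [explodeLoop_eq_gSpec, List.drop_zero]
  rw [foldB_eq input_str.toList [] 2 (by
    cases input_str.toList with
    | nil => trivial
    | cons c cs => exact if h : pyClass c = 2 then Or.inl h else Or.inr h)]
  simp
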